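-- pv_equiv track=rewrite | github.com/laelbarlow/amoebae | amoebaelib/search_alignment_space.py | get_new_type_seqs_dict
-- ===== SOURCE A (Python) =====
-- def get_new_type_seqs_dict(seqname, ml_tree_info_dict, type_seqs_dict):
--     """Take a type sequence name dictionary and a sequence name, and return a
--     new dictionary with the sequence replaced with another sequence if
--     necessary.
--     """
--     # Copy the input dict.
--     type_seqs_dict2 = type_seqs_dict.copy()
--
--     # Determine whether the seqname is one of the type seqnames in the dict.
--     is_type_seq = False
--     for clade in type_seqs_dict2.keys():
--         if seqname == type_seqs_dict2[clade]:
--             is_type_seq = True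
--
--             # If it is a type seq, then replace it with another sequence name.
--             # Identify an alternative type sequence for the same
--             # (current) clade.
--             for seqname2 in\
--             reversed(ml_tree_info_dict[clade]\
--             ['seq names by descending length'].copy()):
--                 if seqname2 != seqname:
--                     # Change type seq for clade to a different sequence.
--                     type_seqs_dict2[clade] = seqname2
--
--     # Return the new dict.
--     return type_seqs_dict2
-- ===== SOURCE B (Python) =====
-- def get_new_type_seqs_dict(seqname, ml_tree_info_dict, type_seqs_dict):
--     """Return a copy of type_seqs_dict where every clade whose type sequence
--     is seqname gets the first differently-named sequence from that clade's
--     'seq names by descending length' list (value unchanged if none differs)."""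
--     return {
--         clade: (next((n for n in
--                       ml_tree_info_dict[clade]['seq names by descending length']
--                       if n != seqname), seqname)
--                 if name == seqname else name)
--         for clade, name in type_seqs_dict.items()
--     }
-- ===== Notes on version B (the rewrite author's own statement) =====
-- stated objective: simpler
-- what changed: Replaces A's in-place reversed-overwrite inner loop (and its unused is_type_seq flag) with a single dict comprehension that picks the replacement by a forward first-match scan of the clade's name list, defaulting to the unchanged name.
import Mathlib
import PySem

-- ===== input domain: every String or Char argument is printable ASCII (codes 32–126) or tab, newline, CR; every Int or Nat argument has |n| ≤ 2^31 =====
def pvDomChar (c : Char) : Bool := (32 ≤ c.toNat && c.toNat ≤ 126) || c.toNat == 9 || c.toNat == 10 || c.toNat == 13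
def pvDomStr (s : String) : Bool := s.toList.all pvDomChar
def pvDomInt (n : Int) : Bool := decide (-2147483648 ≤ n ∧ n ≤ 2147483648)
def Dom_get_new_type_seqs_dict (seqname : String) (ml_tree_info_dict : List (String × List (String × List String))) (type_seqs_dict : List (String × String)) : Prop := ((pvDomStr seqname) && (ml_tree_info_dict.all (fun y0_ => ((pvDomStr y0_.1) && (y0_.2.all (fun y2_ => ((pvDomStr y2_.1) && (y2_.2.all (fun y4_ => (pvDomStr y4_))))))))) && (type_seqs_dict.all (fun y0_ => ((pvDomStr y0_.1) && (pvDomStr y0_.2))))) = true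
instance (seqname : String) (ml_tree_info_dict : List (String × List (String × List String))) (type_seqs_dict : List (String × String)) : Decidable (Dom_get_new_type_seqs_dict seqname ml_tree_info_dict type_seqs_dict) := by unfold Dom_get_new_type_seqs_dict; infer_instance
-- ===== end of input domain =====

-- B replaces A's reversed-overwrite inner loop and unused flag by a single map over the
-- original entries with a forward first-match selection (objective: simpler).

-- ===== PORT A =====
-- Python 'ml_tree_info_dict[clade][...]' (KeyError when missing, excluded by Pre_) is ported
-- with getD []; A's dead local 'is_type_seq' (written, never read) is not carried.
def get_new_type_seqs_dict (seqname : String) (ml_tree_info_dict : List (String × List (String × List String))) (type_seqs_dict : List (String × String)) : List (String × String) :=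
  let mlD : PySem.Dict String (List (String × List String)) := PySem.Dict.ofList ml_tree_info_dict
  let type_seqs_dict2 : PySem.Dict String String := PySem.Dict.ofList type_seqs_dict
  (PySem.Dict.keys type_seqs_dict2).foldl (fun d clade =>
    if PySem.Dict.get? d clade == some seqname then
      (PySem.Dict.getD (PySem.Dict.ofList (PySem.Dict.getD mlD clade []))
        "seq names by descending length" []).reverse.foldl
        (fun d2 seqname2 => if seqname2 ≠ seqname then PySem.Dict.insert d2 clade seqname2 else d2) d
    else d) type_seqs_dict2 |>.items

-- ===== PORT B =====
-- next((n for n in names if n != seqname), seqname)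
def pvFirstAlt (seqname : String) (names : List String) : String :=
  (names.find? (fun n => n != seqname)).getD seqname

def get_new_type_seqs_dict_alt (seqname : String) (ml_tree_info_dict : List (String × List (String × List String))) (type_seqs_dict : List (String × String)) : List (String × String) :=
  (PySem.Dict.ofList type_seqs_dict).items.map (fun p =>
    if p.2 == seqname then
      (p.1, pvFirstAlt seqname
        (PySem.Dict.getD
          (PySem.Dict.ofList (PySem.Dict.getD (PySem.Dict.ofList ml_tree_info_dict) p.1 []))
          "seq names by descending length" []))
    else p)

-- ===== PRECONDITION & SPEC =====
-- Pre_ excludes exactly the inputs on which the Python raises KeyError: a clade whose type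
-- sequence equals seqname but is missing from ml_tree_info_dict, or whose entry there lacks
-- the 'seq names by descending length' key.
def Pre_get_new_type_seqs_dict (seqname : String) (ml_tree_info_dict : List (String × List (String × List String))) (type_seqs_dict : List (String × String)) : Prop :=
  ∀ p ∈ (PySem.Dict.ofList type_seqs_dict).items, p.2 = seqname →
    PySem.Dict.contains (PySem.Dict.ofList ml_tree_info_dict) p.1 = true ∧
    PySem.Dict.contains
      (PySem.Dict.ofList (PySem.Dict.getD (PySem.Dict.ofList ml_tree_info_dict) p.1 []))
      "seq names by descending length" = true
instance (seqname : String) (ml_tree_info_dict : List (String × List (String × List String))) (type_seqs_dict : List (String × String)) : Decidable (Pre_get_new_type_seqs_dict seqname ml_tree_info_dict type_seqs_dict) := by unfold Pre_get_new_type_seqs_dict; infer_instance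

def pvWitness_get_new_type_seqs_dict : String × (List (String × List (String × List String))) × (List (String × String)) :=
  ("s1", [("c1", [("seq names by descending length", ["s1", "s2"])])], [("c1", "s1"), ("c2", "s3")])

def Spec_get_new_type_seqs_dict (seqname : String) (ml_tree_info_dict : List (String × List (String × List String))) (type_seqs_dict : List (String × String)) (out : List (String × String)) : Prop := out = get_new_type_seqs_dict_alt seqname ml_tree_info_dict type_seqs_dict
instance (seqname : String) (ml_tree_info_dict : List (String × List (String × List String))) (type_seqs_dict : List (String × String)) (out : List (String × String)) : Decidable (Spec_get_new_type_seqs_dict seqname ml_tree_info_dict type_seqs_dict out) := by unfold Spec_get_new_type_seqs_dict; infer_instance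

-- ===== CLAIM (what is proved, stated in full; the proofs are below) =====
def Claim_equal_get_new_type_seqs_dict : Prop := ∀ (seqname : String) (ml_tree_info_dict : List (String × List (String × List String))) (type_seqs_dict : List (String × String)), Dom_get_new_type_seqs_dict seqname ml_tree_info_dict type_seqs_dict → Pre_get_new_type_seqs_dict seqname ml_tree_info_dict type_seqs_dict → Spec_get_new_type_seqs_dict seqname ml_tree_info_dict type_seqs_dict (get_new_type_seqs_dict seqname ml_tree_info_dict type_seqs_dict)

-- ===== LEMMAS AND PROOFS =====

-- A's reversed overwrite loop keeps the LAST written name, i.e. the FIRST forward name ≠ seqname.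
theorem pv_inner_fold (seqname c : String) (names : List String) (d : PySem.Dict String String) :
    names.reverse.foldl (fun d2 s2 => if s2 ≠ seqname then PySem.Dict.insert d2 c s2 else d2) d
      = match names.find? (fun n => n != seqname) with
        | some r => PySem.Dict.insert d c r
        | none => d := by
  rw [List.foldl_reverse]
  induction names with
  | nil => rfl
  | cons n ns ih =>
    rw [List.foldr_cons, ih, List.find?_cons]
    by_cases hn : n = seqname
    · simp [hn]
    · have hb : (n != seqname) = true := by simp [hn]
      rw [if_pos hn, hb]
      cases hfind : ns.find? (fun n => n != seqname) with
      | none => simp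
      | some r => simp [PySem.Dict.insert_insert_self]

-- the pointwise replacement B performs on each entry, for a given name table
def pvG (seqname : String) (namesOf : String → List String) (p : String × String) : String × String :=
  if p.2 == seqname then (p.1, pvFirstAlt seqname (namesOf p.1)) else p

-- Invariant of A's outer loop: processing the keys of the tail maps the tail entries through pvG.
theorem pv_outer (seqname : String) (namesOf : String → List String) :
    ∀ (post pre : List (String × String)),
    ((pre ++ post).map Prod.fst).Nodup →
    (post.map Prod.fst).foldl (fun d clade =>
        if PySem.Dict.get? d clade == some seqname then
          (namesOf clade).reverse.foldl
            (fun d2 s2 => if s2 ≠ seqname then PySem.Dict.insert d2 clade s2 else d2) d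
        else d) ⟨pre ++ post⟩
      = ⟨pre ++ post.map (pvG seqname namesOf)⟩ := by
  intro post
  induction post with
  | nil => intro pre _; simp
  | cons q rest ih =>
    intro pre hnd
    obtain ⟨c, v⟩ := q
    have hnd' := hnd
    simp only [List.map_append, List.map_cons, List.nodup_append, List.nodup_cons] at hnd'
    obtain ⟨hpre, ⟨hcr, hrest⟩, hdisj⟩ := hnd'
    have hcpre : ∀ p ∈ pre, p.1 ≠ c := fun p hp =>
      hdisj p.1 (List.mem_map_of_mem hp) c (List.mem_cons_self ..)
    have hcrest : ∀ p ∈ rest, p.1 ≠ c := by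
      intro p hp h
      exact hcr (h ▸ List.mem_map_of_mem hp)
    -- get? at the head key c reads v
    have hget : PySem.Dict.get? (⟨pre ++ (c, v) :: rest⟩ : PySem.Dict String String) c = some v := by
      simp only [PySem.Dict.get?, List.find?_append]
      have : pre.find? (fun p => p.1 == c) = none := by
        rw [List.find?_eq_none]; intro p hp; simpa using hcpre p hp
      simp [this]
    -- insert at c rewrites exactly the head entry
    have hins : ∀ r, PySem.Dict.insert (⟨pre ++ (c, v) :: rest⟩ : PySem.Dict String String) c r
        = ⟨pre ++ (c, r) :: rest⟩ := by
      intro r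
      have hcont : PySem.Dict.contains (⟨pre ++ (c, v) :: rest⟩ : PySem.Dict String String) c = true := by
        rw [PySem.Dict.contains_eq_isSome_get?, hget]; rfl
      have hmap : ∀ (l : List (String × String)), (∀ p ∈ l, p.1 ≠ c) →
          l.map (fun p => if (p.1 == c) = true then (c, r) else p) = l := by
        intro l hl
        conv_rhs => rw [← List.map_id l]
        refine List.map_congr_left (fun p hp => ?_)
        rw [if_neg (by simpa using hl p hp)]
        rfl
      simp only [PySem.Dict.insert, hcont, if_pos, List.map_append, List.map_cons,
        hmap pre hcpre, hmap rest hcrest, beq_self_eq_true]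
    simp only [List.map_cons, List.foldl_cons, hget]
    have hstep : (if (some v == some seqname) = true then
          (namesOf c).reverse.foldl
            (fun d2 s2 => if s2 ≠ seqname then PySem.Dict.insert d2 c s2 else d2)
            (⟨pre ++ (c, v) :: rest⟩ : PySem.Dict String String)
        else (⟨pre ++ (c, v) :: rest⟩ : PySem.Dict String String))
        = ⟨pre ++ pvG seqname namesOf (c, v) :: rest⟩ := by
      by_cases hv : v = seqname
      · have hb : (some v == some seqname) = true := by simp [hv]
        rw [if_pos hb, pv_inner_fold]
        cases hf : (namesOf c).find? (fun n => n != seqname) with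
        | none => simp [pvG, pvFirstAlt, hf, hv]
        | some r =>
          have h2 : pvG seqname namesOf (c, v) = (c, r) := by simp [pvG, pvFirstAlt, hf, hv]
          rw [h2]
          exact hins r
      · have hb : (some v == some seqname) = false := by simp [hv]
        rw [hb]; simp [pvG, hv]
    rw [hstep]
    have hassoc : pre ++ pvG seqname namesOf (c, v) :: rest
        = (pre ++ [pvG seqname namesOf (c, v)]) ++ rest := by simp
    rw [hassoc, ih]
    · simp
    · have h1 : (pvG seqname namesOf (c, v)).1 = c := by
        unfold pvG; by_cases hv : v = seqname <;> simp [hv]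
      have heq : ((pre ++ [pvG seqname namesOf (c, v)]) ++ rest).map Prod.fst
          = (pre ++ (c, v) :: rest).map Prod.fst := by
        simp [h1]
      rw [heq]; exact hnd

-- ===== VERDICT (by name: the statement is the Claim_ definition above) =====
theorem get_new_type_seqs_dict_spec : Claim_equal_get_new_type_seqs_dict := by
  intro seqname ml tsd _ _
  unfold Spec_get_new_type_seqs_dict get_new_type_seqs_dict get_new_type_seqs_dict_alt
  have hnd : ((PySem.Dict.ofList tsd : PySem.Dict String String).items.map Prod.fst).Nodup :=
    PySem.Dict.nodup_keys_ofList tsd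
  have := pv_outer seqname
    (fun clade => PySem.Dict.getD
      (PySem.Dict.ofList (PySem.Dict.getD (PySem.Dict.ofList ml) clade []))
      "seq names by descending length" [])
    (PySem.Dict.ofList tsd).items []
    (by simpa using hnd)
  simp only [List.nil_append] at this
  simp only [PySem.Dict.keys]
  rw [show (PySem.Dict.ofList tsd : PySem.Dict String String) = ⟨(PySem.Dict.ofList tsd : PySem.Dict String String).items⟩ from rfl] at this ⊢
  rw [this]
  rfl
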